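-- pv_equiv track=rewrite | github.com/roeselfa/FeatureLearningBasedDistanceMetrics | Evaluation/AdvancedBA.py | getFollowsRelations
-- ===== SOURCE A (Python) =====
-- def getFollowersOfEventInTrace(event, trace):
--     followers = list()
--     if event not in trace:
--         return followers
--     eventIndex = trace.index(event)
--     restTrace = trace[eventIndex + 1:]
--
--     for e in restTrace:
--         if e not in followers:
--             followers.append(e)
--
--     return followers
--
-- def getFollowsRelations(allEvents, traces):
--     followsMatrix = {}
--
--     for event in allEvents:
--         alwaysFollows = allEvents.copy()
--         neverFollows = allEvents.copy()
--
--         for eClmn in allEvents: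
--             followsMatrix[(event, eClmn)] = 'S'
--
--         for trace in traces:
--             if event in trace:
--                 followers = getFollowersOfEventInTrace(event, trace)
--                 for f in followers:
--                     if f in neverFollows:
--                         neverFollows.remove(f)
--
--                 for e in allEvents:
--                     if e not in followers:
--                         if e in alwaysFollows:
--                             alwaysFollows.remove(e)
--
--         for a in alwaysFollows:
--             followsMatrix[(event, a)] = 'A'
--
--         for n in neverFollows:
--             followsMatrix[(event, n)] = 'N'
--
--     return followsMatrix
-- ===== SOURCE B (Python) =====
-- def getFollowsRelations(allEvents, traces):
--     followsMatrix = {}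
--     for event in allEvents:
--         rests = [t[t.index(event) + 1:] for t in traces if event in t]
--         for e in allEvents:
--             c = sum(1 for rest in rests if e in rest)
--             if not rests:
--                 v = 'N'
--             elif c == len(rests):
--                 v = 'A'
--             elif c == 0:
--                 v = 'N'
--             else:
--                 v = 'S'
--             followsMatrix[(event, e)] = v
--     return followsMatrix
-- ===== Notes on version B (the rewrite author's own statement) =====
-- stated objective: simpler
-- what changed: A maintains two shrinking copies of allEvents (alwaysFollows/neverFollows) mutated across traces via list.remove; B instead collects the tail of each trace after the event once and classifies each pair directly by counting the containing traces whose tail holds the candidate follower.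
import Mathlib
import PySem

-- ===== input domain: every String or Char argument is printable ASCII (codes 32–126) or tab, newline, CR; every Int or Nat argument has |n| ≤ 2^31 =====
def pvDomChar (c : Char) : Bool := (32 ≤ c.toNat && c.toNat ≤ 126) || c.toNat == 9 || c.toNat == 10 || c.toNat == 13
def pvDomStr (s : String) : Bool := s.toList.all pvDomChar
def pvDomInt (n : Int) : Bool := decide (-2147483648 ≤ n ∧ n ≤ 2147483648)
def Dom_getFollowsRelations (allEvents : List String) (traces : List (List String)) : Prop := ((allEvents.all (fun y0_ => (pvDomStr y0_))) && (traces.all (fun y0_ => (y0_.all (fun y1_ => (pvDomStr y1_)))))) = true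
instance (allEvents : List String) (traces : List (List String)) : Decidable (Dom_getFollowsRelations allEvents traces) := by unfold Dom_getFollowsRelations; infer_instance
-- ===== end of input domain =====

-- B replaces A's shrinking always/never copies of allEvents with a direct per-pair count of
-- containing traces in which the candidate follower occurs, classified by a formula (objective: simpler).


-- ===== PORT A =====
def getFollowersOfEventInTrace (event : String) (trace : List String) : List String :=
  let followers : List String := []
  if event ∉ trace then followers
  else
    let eventIndex := (PySem.List.index? trace event).getD 0
    let restTrace := PySem.List.slice trace (some ((eventIndex : Int) + 1)) none
    restTrace.foldl (fun fs e => if e ∈ fs then fs else fs ++ [e]) followers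

def getFollowsRelations (allEvents : List String) (traces : List (List String)) : List (String × String × String) :=
  let followsMatrix : PySem.Dict (String × String) String := PySem.Dict.empty
  let followsMatrix := allEvents.foldl (fun fm event =>
    let alwaysFollows := allEvents
    let neverFollows := allEvents
    let fm := allEvents.foldl (fun fm eClmn => fm.insert (event, eClmn) "S") fm
    let st := traces.foldl (fun (st : List String × List String) trace =>
      if event ∈ trace then
        let followers := getFollowersOfEventInTrace event trace
        let neverFollows := followers.foldl (fun nv f => if f ∈ nv then nv.erase f else nv) st.2
        let alwaysFollows := allEvents.foldl (fun al e =>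
          if e ∉ followers then (if e ∈ al then al.erase e else al) else al) st.1
        (alwaysFollows, neverFollows)
      else st) (alwaysFollows, neverFollows)
    let fm := st.1.foldl (fun fm a => fm.insert (event, a) "A") fm
    let fm := st.2.foldl (fun fm n => fm.insert (event, n) "N") fm
    fm) followsMatrix
  followsMatrix.items.map (fun kv => (kv.1.1, kv.1.2, kv.2))

-- ===== PORT B =====
def getFollowsRelations_alt (allEvents : List String) (traces : List (List String)) : List (String × String × String) :=
  let followsMatrix := allEvents.foldl (fun fm event =>
    let rests := (traces.filter (fun t => event ∈ t)).map (fun t =>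
      PySem.List.slice t (some (((PySem.List.index? t event).getD 0 : Int) + 1)) none)
    allEvents.foldl (fun fm e =>
      let c := (rests.filter (fun rest => e ∈ rest)).length
      let v := if rests.isEmpty then "N"
               else if c = rests.length then "A"
               else if c = 0 then "N" else "S"
      fm.insert (event, e) v) fm) (PySem.Dict.empty : PySem.Dict (String × String) String)
  followsMatrix.items.map (fun kv => (kv.1.1, kv.1.2, kv.2))

-- ===== PRECONDITION & SPEC =====
-- Pre_ excludes duplicate entries in allEvents: there A's list.remove-once bookkeeping on its two
-- shrinking copies of allEvents yields accidental classifications (e.g. a sometimes-follower marked 'N');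
-- B classifies such duplicate keys naturally by count instead.
def Pre_getFollowsRelations (allEvents : List String) (traces : List (List String)) : Prop :=
  allEvents.Nodup
instance (allEvents : List String) (traces : List (List String)) : Decidable (Pre_getFollowsRelations allEvents traces) := by unfold Pre_getFollowsRelations; infer_instance

def pvWitness_getFollowsRelations : List String × List (List String) :=
  (["a", "b"], [["a", "c", "b"], ["b", "a"]])

def Spec_getFollowsRelations (allEvents : List String) (traces : List (List String)) (out : List (String × String × String)) : Prop := out = getFollowsRelations_alt allEvents traces
instance (allEvents : List String) (traces : List (List String)) (out : List (String × String × String)) : Decidable (Spec_getFollowsRelations allEvents traces out) := by unfold Spec_getFollowsRelations; infer_instance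

-- ===== CLAIM (what is proved, stated in full; the proofs are below) =====
def Claim_equal_getFollowsRelations : Prop := ∀ (allEvents : List String) (traces : List (List String)), Dom_getFollowsRelations allEvents traces → Pre_getFollowsRelations allEvents traces → Spec_getFollowsRelations allEvents traces (getFollowsRelations allEvents traces)

-- ===== LEMMAS AND PROOFS =====

-- the tail of t after the first occurrence of event (t[t.index(event)+1:])
def pvRest (event : String) (t : List String) : List String :=
  PySem.List.slice t (some (((PySem.List.index? t event).getD 0 : Int) + 1)) none

-- the tails of the traces that contain event, in trace order
def pvRests (event : String) (traces : List (List String)) : List (List String) :=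
  (traces.filter (fun t => event ∈ t)).map (pvRest event)

-- B's classification value for the pair (event, e)
def pvVal (event : String) (traces : List (List String)) (e : String) : String :=
  let rests := pvRests event traces
  let c := (rests.filter (fun rest => e ∈ rest)).length
  if rests.isEmpty then "N" else if c = rests.length then "A" else if c = 0 then "N" else "S"

lemma followers_eq (event : String) (t : List String) (h : event ∈ t) :
    getFollowersOfEventInTrace event t = PySem.Set.ofList (pvRest event t) := by
  simp only [getFollowersOfEventInTrace, pvRest, if_neg (not_not_intro h)]
  rw [PySem.Set.ofList_eq_foldl]
  exact PySem.List.foldl_congr_mem _ _ _ _ (fun acc x _ => (PySem.Set.add_eq_ite acc x).symm)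

lemma eraseFold (fs : List String) :
    ∀ (nv : List String), nv.Nodup →
      fs.foldl (fun nv f => if f ∈ nv then nv.erase f else nv) nv
        = nv.filter (fun x => decide (x ∉ fs)) := by
  induction fs with
  | nil => intro nv _; simp
  | cons f rest ih =>
    intro nv hnd
    have hstep : (if f ∈ nv then nv.erase f else nv) = nv.filter (fun x => x != f) := by
      by_cases hf : f ∈ nv
      · rw [if_pos hf, hnd.erase_eq_filter]
      · rw [if_neg hf, eq_comm, List.filter_eq_self]
        intro x hx
        simp only [bne_iff_ne, ne_eq]
        exact fun he => hf (he ▸ hx)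
    rw [List.foldl_cons, hstep, ih _ (hnd.filter _), List.filter_filter]
    refine List.filter_congr (fun x _ => ?_)
    by_cases h1 : x = f <;> by_cases h2 : x ∈ rest <;> simp [h1, h2]

lemma alwaysFold (followers : List String) (L : List String) :
    ∀ (al : List String), al.Nodup →
      L.foldl (fun al e => if e ∉ followers then (if e ∈ al then al.erase e else al) else al) al
        = al.filter (fun x => decide (¬ (x ∈ L ∧ x ∉ followers))) := by
  induction L with
  | nil => intro al _; simp
  | cons e rest ih =>
    intro al hnd
    by_cases hef : e ∉ followers
    · have hstep : (if e ∈ al then al.erase e else al) = al.filter (fun x => x != e) := by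
        by_cases he : e ∈ al
        · rw [if_pos he, hnd.erase_eq_filter]
        · rw [if_neg he, eq_comm, List.filter_eq_self]
          intro x hx
          simp only [bne_iff_ne, ne_eq]
          exact fun hxe => he (hxe ▸ hx)
      rw [List.foldl_cons, if_pos hef, hstep, ih _ (hnd.filter _), List.filter_filter]
      refine List.filter_congr (fun x _ => ?_)
      by_cases h1 : x = e <;> by_cases h2 : x ∈ rest <;> by_cases h3 : x ∈ followers <;>
        simp [h1, h2, h3, hef]
    · rw [List.foldl_cons, if_neg hef, ih _ hnd]
      refine List.filter_congr (fun x _ => ?_)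
      have hf : e ∈ followers := not_not.mp hef
      by_cases h1 : x = e <;> by_cases h2 : x ∈ rest <;> by_cases h3 : x ∈ followers <;>
        simp_all

lemma traceFold (event : String) (allEvents : List String) (hnd : allEvents.Nodup) :
    ∀ (ts : List (List String)) (pa pn : String → Bool),
      ts.foldl (fun (st : List String × List String) trace =>
        if event ∈ trace then
          let followers := getFollowersOfEventInTrace event trace
          let neverFollows := followers.foldl (fun nv f => if f ∈ nv then nv.erase f else nv) st.2
          let alwaysFollows := allEvents.foldl (fun al e =>
            if e ∉ followers then (if e ∈ al then al.erase e else al) else al) st.1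
          (alwaysFollows, neverFollows)
        else st) (allEvents.filter pa, allEvents.filter pn)
      = (allEvents.filter (fun e => pa e && (pvRests event ts).all (fun r => decide (e ∈ r))),
         allEvents.filter (fun e => pn e && (pvRests event ts).all (fun r => decide (e ∉ r)))) := by
  intro ts
  induction ts with
  | nil => intro pa pn; simp [pvRests]
  | cons t ts ih =>
    intro pa pn
    by_cases ht : event ∈ t
    · have hmem : ∀ x, x ∈ getFollowersOfEventInTrace event t ↔ x ∈ pvRest event t := by
        intro x
        rw [followers_eq event t ht, PySem.Set.mem_ofList]
      have hAl : allEvents.foldl (fun al e =>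
            if e ∉ getFollowersOfEventInTrace event t then (if e ∈ al then al.erase e else al) else al)
            (allEvents.filter pa)
          = allEvents.filter (fun x => pa x && decide (x ∈ pvRest event t)) := by
        rw [alwaysFold _ _ _ (hnd.filter _), List.filter_filter]
        refine List.filter_congr (fun x hx => ?_)
        by_cases h3 : x ∈ pvRest event t <;> by_cases h4 : pa x <;>
          simp [hmem, h3, h4, hx]
      have hNv : (getFollowersOfEventInTrace event t).foldl
            (fun nv f => if f ∈ nv then nv.erase f else nv) (allEvents.filter pn)
          = allEvents.filter (fun x => pn x && decide (x ∉ pvRest event t)) := by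
        rw [eraseFold _ _ (hnd.filter _), List.filter_filter]
        refine List.filter_congr (fun x hx => ?_)
        by_cases h3 : x ∈ pvRest event t <;> by_cases h4 : pn x <;>
          simp [hmem, h3, h4]
      have hres : pvRests event (t :: ts) = pvRest event t :: pvRests event ts := by
        simp [pvRests, ht]
      rw [List.foldl_cons, if_pos ht]
      simp only []
      rw [hAl, hNv, ih, hres]
      refine Prod.ext ?_ ?_ <;>
        · refine List.filter_congr (fun x hx => ?_)
          simp [List.all_cons, Bool.and_assoc]
    · rw [List.foldl_cons, if_neg ht, ih]
      have hres : pvRests event (t :: ts) = pvRests event ts := by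
        simp [pvRests, ht]
      rw [hres]

lemma foldl_insert_fresh (event : String) (v : String → String) :
    ∀ (l : List String) (d : PySem.Dict (String × String) String),
      l.Nodup → (∀ e ∈ l, (event, e) ∉ d.keys) →
      (l.foldl (fun fm e => fm.insert (event, e) (v e)) d).items
        = d.items ++ l.map (fun e => ((event, e), v e)) := by
  intro l
  induction l with
  | nil => intro d _ _; simp
  | cons e rest ih =>
    intro d hnd hfresh
    have hc : d.contains (event, e) = false := by
      rw [Bool.eq_false_iff]
      intro hcc
      exact hfresh e List.mem_cons_self ((PySem.Dict.contains_iff_mem_keys d _).mp hcc)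
    have hitems : (d.insert (event, e) (v e)).items = d.items ++ [((event, e), v e)] :=
      PySem.Dict.items_insert_of_not_contains d (v e) hc
    have hkeys : (d.insert (event, e) (v e)).keys = d.keys ++ [(event, e)] := by
      simp only [PySem.Dict.keys, hitems, List.map_append, List.map_cons, List.map_nil]
    rw [List.foldl_cons, ih _ (hnd.of_cons) ?hfresh', hitems]
    · simp
    case hfresh' =>
      intro e' he'
      rw [hkeys]
      simp only [List.mem_append, List.mem_singleton, Prod.mk.injEq]
      rintro (hk | ⟨-, rfl⟩)
      · exact hfresh e' (List.mem_cons_of_mem _ he') hk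
      · exact (List.nodup_cons.mp hnd).1 he'

lemma foldl_insert_overwrite (event : String) (val : String) :
    ∀ (sub : List String) (d0 : List ((String × String) × String)) (l : List String)
      (w : String → String),
      (∀ p ∈ d0, p.1.1 ≠ event) → sub ⊆ l →
      (sub.foldl (fun fm a => fm.insert (event, a) val)
          (PySem.Dict.mk (d0 ++ l.map (fun e => ((event, e), w e))))).items
        = d0 ++ l.map (fun e => ((event, e), if e ∈ sub then val else w e)) := by
  intro sub
  induction sub with
  | nil => intro d0 l w _ _; simp
  | cons a sub' ih =>
    intro d0 l w hd0 hsub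
    have hal : a ∈ l := hsub List.mem_cons_self
    have hc : (PySem.Dict.mk (d0 ++ l.map (fun e => ((event, e), w e)))).contains (event, a) = true := by
      rw [PySem.Dict.contains_iff_mem_keys]
      simp only [PySem.Dict.keys, List.map_append, List.mem_append, List.map_map]
      right
      exact List.mem_map.mpr ⟨a, hal, rfl⟩
    have hstep : (PySem.Dict.mk (d0 ++ l.map (fun e => ((event, e), w e)))).insert (event, a) val
        = PySem.Dict.mk (d0 ++ l.map (fun e => ((event, e), if e = a then val else w e))) := by
      apply PySem.Dict.ext
      rw [PySem.Dict.items_insert_of_contains _ _ hc]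
      show List.map _ (d0 ++ l.map (fun e => ((event, e), w e))) = _
      rw [List.map_append, List.map_map]
      congr 1
      · refine (List.map_congr_left (fun p hp => ?_)).trans (List.map_id d0)
        have : (p.1 == (event, a)) = false := by
          rw [beq_eq_false_iff_ne]
          intro hpe
          exact hd0 p hp (by rw [hpe])
        simp [this]
      · refine List.map_congr_left (fun e _ => ?_)
        by_cases hea : e = a
        · subst hea; simp
        · have : ((event, e) == (event, a)) = false := by
            rw [beq_eq_false_iff_ne]
            simp [hea]
          simp [Function.comp, this, hea]
    rw [List.foldl_cons, hstep, ih d0 l _ hd0 (fun x hx => hsub (List.mem_cons_of_mem _ hx))]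
    congr 1
    refine List.map_congr_left (fun e _ => ?_)
    by_cases h1 : e ∈ sub' <;> by_cases h2 : e = a <;> simp [h1, h2]

lemma val_eq (event : String) (traces : List (List String)) (allEvents : List String)
    (e : String) (he : e ∈ allEvents) :
    (if e ∈ allEvents.filter (fun x => true && (pvRests event traces).all (fun r => decide (x ∉ r))) then "N"
     else if e ∈ allEvents.filter (fun x => true && (pvRests event traces).all (fun r => decide (x ∈ r))) then "A"
     else "S") = pvVal event traces e := by
  simp only [pvVal, List.mem_filter, he, true_and, Bool.true_and, List.all_eq_true,
    decide_eq_true_eq]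
  have hc : (List.filter (fun rest => decide (e ∈ rest)) (pvRests event traces)).length
      = (pvRests event traces).countP (fun rest => decide (e ∈ rest)) :=
    (List.countP_eq_length_filter).symm
  by_cases h0 : pvRests event traces = []
  · simp [h0]
  · have hne : (pvRests event traces).isEmpty = false := by
      simp [h0]
    have hlen : 0 < (pvRests event traces).length := List.length_pos_iff.mpr h0
    rw [hc, hne]
    by_cases hall : ∀ r ∈ pvRests event traces, e ∉ r
    · have hz : (pvRests event traces).countP (fun rest => decide (e ∈ rest)) = 0 :=
        List.countP_eq_zero.mpr (by simpa using hall)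
      rw [if_pos hall, hz]
      have : ¬ (0 = (pvRests event traces).length) := by omega
      simp [this]
    · rw [if_neg hall]
      by_cases hallin : ∀ r ∈ pvRests event traces, e ∈ r
      · have hl : (pvRests event traces).countP (fun rest => decide (e ∈ rest))
            = (pvRests event traces).length :=
          List.countP_eq_length.mpr (by simpa using hallin)
        simp only [hl, if_pos hallin]
        simp
      · have h1 : (pvRests event traces).countP (fun rest => decide (e ∈ rest))
            ≠ (pvRests event traces).length := by
          intro hcontra
          exact hallin (by simpa using List.countP_eq_length.mp hcontra)
        have h2 : (pvRests event traces).countP (fun rest => decide (e ∈ rest)) ≠ 0 := by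
          intro hcontra
          exact hall (by simpa using List.countP_eq_zero.mp hcontra)
        simp [hallin, h1, h2]

lemma outerFold (traces : List (List String)) (allEvents : List String) (hnd : allEvents.Nodup) :
    ∀ (l : List String), l.Nodup →
      ∀ (d : PySem.Dict (String × String) String), (∀ ev ∈ l, ∀ p ∈ d.items, p.1.1 ≠ ev) →
      l.foldl (fun fm event =>
        let alwaysFollows := allEvents
        let neverFollows := allEvents
        let fm := allEvents.foldl (fun fm eClmn => fm.insert (event, eClmn) "S") fm
        let st := traces.foldl (fun (st : List String × List String) trace =>
          if event ∈ trace then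
            let followers := getFollowersOfEventInTrace event trace
            let neverFollows := followers.foldl (fun nv f => if f ∈ nv then nv.erase f else nv) st.2
            let alwaysFollows := allEvents.foldl (fun al e =>
              if e ∉ followers then (if e ∈ al then al.erase e else al) else al) st.1
            (alwaysFollows, neverFollows)
          else st) (alwaysFollows, neverFollows)
        let fm := st.1.foldl (fun fm a => fm.insert (event, a) "A") fm
        let fm := st.2.foldl (fun fm n => fm.insert (event, n) "N") fm
        fm) d
      = l.foldl (fun fm event =>
        let rests := (traces.filter (fun t => event ∈ t)).map (fun t =>
          PySem.List.slice t (some (((PySem.List.index? t event).getD 0 : Int) + 1)) none)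
        allEvents.foldl (fun fm e =>
          let c := (rests.filter (fun rest => e ∈ rest)).length
          let v := if rests.isEmpty then "N"
                   else if c = rests.length then "A"
                   else if c = 0 then "N" else "S"
          fm.insert (event, e) v) fm) d := by
  intro l
  induction l with
  | nil => intro _ d _; rfl
  | cons ev rest ih =>
    intro hndl d hfresh
    have hd0 : ∀ p ∈ d.items, p.1.1 ≠ ev := hfresh ev List.mem_cons_self
    have hfr : ∀ e ∈ allEvents, (ev, e) ∉ d.keys := by
      intro e _ hk
      simp only [PySem.Dict.keys, List.mem_map] at hk
      obtain ⟨p, hp, hpe⟩ := hk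
      exact hd0 p hp (by rw [hpe])
    -- the A step
    have hSd : (allEvents.foldl (fun fm eClmn => fm.insert (ev, eClmn) "S") d)
        = PySem.Dict.mk (d.items ++ allEvents.map (fun e => ((ev, e), (fun (_ : String) => "S") e))) :=
      PySem.Dict.ext (foldl_insert_fresh ev (fun _ => "S") allEvents d hnd hfr)
    have hstate := traceFold ev allEvents hnd traces (fun _ => true) (fun _ => true)
    rw [List.filter_true] at hstate
    have hAd : ((allEvents.filter (fun e => true && (pvRests ev traces).all (fun r => decide (e ∈ r)))).foldl
          (fun fm a => fm.insert (ev, a) "A")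
          (PySem.Dict.mk (d.items ++ allEvents.map (fun e => ((ev, e), (fun (_ : String) => "S") e)))))
        = PySem.Dict.mk (d.items ++ allEvents.map (fun e => ((ev, e),
            (fun e => if e ∈ allEvents.filter (fun x => true && (pvRests ev traces).all (fun r => decide (x ∈ r))) then "A" else (fun (_ : String) => "S") e) e))) :=
      PySem.Dict.ext (foldl_insert_overwrite ev "A" _ d.items allEvents _ hd0 (List.filter_subset' _))
    have hNd : ((allEvents.filter (fun e => true && (pvRests ev traces).all (fun r => decide (e ∉ r)))).foldl
          (fun fm n => fm.insert (ev, n) "N")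
          (PySem.Dict.mk (d.items ++ allEvents.map (fun e => ((ev, e),
            (fun e => if e ∈ allEvents.filter (fun x => true && (pvRests ev traces).all (fun r => decide (x ∈ r))) then "A" else (fun (_ : String) => "S") e) e)))))
        = PySem.Dict.mk (d.items ++ allEvents.map (fun e => ((ev, e), pvVal ev traces e))) := by
      refine PySem.Dict.ext ?_
      refine (foldl_insert_overwrite ev "N" _ d.items allEvents _ hd0 (List.filter_subset' _)).trans ?_
      refine congrArg _ (List.map_congr_left (fun e he => ?_))
      exact congrArg _ (val_eq ev traces allEvents e he)
    have hZfresh : ∀ ev' ∈ rest, ∀ p ∈ (PySem.Dict.mk (d.items ++ allEvents.map (fun e => ((ev, e), pvVal ev traces e)))).items, p.1.1 ≠ ev' := by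
      intro ev' hev' p hp
      rcases List.mem_append.mp hp with hold | hnew
      · exact hfresh ev' (List.mem_cons_of_mem _ hev') p hold
      · obtain ⟨e, -, rfl⟩ := List.mem_map.mp hnew
        intro hcontra
        simp only at hcontra
        exact (List.nodup_cons.mp hndl).1 (by rw [← hcontra] at hev'; exact hev')
    have hZY : PySem.Dict.mk (d.items ++ allEvents.map (fun e => ((ev, e), pvVal ev traces e)))
        = allEvents.foldl (fun fm e => fm.insert (ev, e) (pvVal ev traces e)) d :=
      (PySem.Dict.ext (foldl_insert_fresh ev (fun e => pvVal ev traces e) allEvents d hnd hfr)).symm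
    rw [List.foldl_cons, List.foldl_cons]
    simp only []
    rw [hstate]
    simp only []
    rw [hSd, hAd, hNd]
    exact (ih (List.nodup_cons.mp hndl).2 _ hZfresh).trans
      (congrArg (fun x => List.foldl _ x rest) hZY)

-- ===== VERDICT (by name: the statement is the Claim_ definition above) =====
theorem getFollowsRelations_spec : Claim_equal_getFollowsRelations := by
  intro allEvents traces _ hpre
  unfold Spec_getFollowsRelations
  unfold getFollowsRelations getFollowsRelations_alt
  simp only []
  exact congrArg (fun fm : PySem.Dict (String × String) String =>
      fm.items.map (fun kv => (kv.1.1, kv.1.2, kv.2)))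
    (outerFold traces allEvents hpre allEvents hpre PySem.Dict.empty
      (fun _ _ _ hp => nomatch hp))
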